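-- pv_equiv track=rewrite | github.com/snehapatil1/leetcode-solutions | leetcode/problems/check_if_word_can_be_placed_in_crossword/solution.py | placeWordInCrossword
-- ===== SOURCE A (Python) =====
-- from typing import List
--
-- def placeWordInCrossword(board: List[List[str]], word: str) -> bool:
--
--     def dfs(pos, direction, word_idx):
--
--         is_boundary = pos[0] < 0 or pos[0] > m-1 or pos[1] < 0 or pos[1] > n-1 or board[pos[0]][pos[1]] == '#'
--
--         if word_idx == len(word):
--             return is_boundary
--
--         if is_boundary or (board[pos[0]][pos[1]] != ' ' and board[pos[0]][pos[1]] != word[word_idx]):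
--             return False
--
--         if not direction:
--             for i, j in move:
--                 prev = pos[0] - i, pos[1] - j
--                 if 0<=prev[0]<m and 0<=prev[1]<n and board[prev[0]][prev[1]] != '#':
--                     continue
--
--                 nxt = pos[0] + i, pos[1] + j
--                 if dfs(nxt, (i,j), word_idx+1 ):
--                     return True
--
--         else:
--             nxt = pos[0] + direction[0], pos[1] + direction[1]
--             if dfs(nxt, direction, word_idx + 1):
--                 return True
--
--
--     m = len(board)
--     n = len(board[0])
--     move = [(0, 1), (1, 0), (-1, 0), (0, -1)]
--
--     for i in range(m):
--         for j in range(n):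
--             if board[i][j] == ' ' or board[i][j] == word[0]:
--                 if dfs((i,j), None, 0):
--                     return True
--
--     return False
-- ===== SOURCE B (Python) =====
-- def placeWordInCrossword(board, word):
--     # Scan each row and each column of the m x n grid (n is the first row's
--     # width, as in the original), split it at '#' into maximal segments, and
--     # accept iff some segment has the word's length and matches it forwards or
--     # backwards (blanks ' ' match anything).
--     n = len(board[0])
--     grid = [row[:n] for row in board]
--     L = len(word)
--     rev = word[::-1]
--
--     def good(seg):
--         if len(seg) != L:
--             return False
--         return (all(c == ' ' or c == w for c, w in zip(seg, word)) or
--                 all(c == ' ' or c == w for c, w in zip(seg, rev)))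
--
--     lines = grid + [list(col) for col in zip(*grid)]
--     for line in lines:
--         seg = []
--         for cell in line + ['#']:
--             if cell == '#':
--                 if good(seg):
--                     return True
--                 seg = []
--             else:
--                 seg.append(cell)
--     return False
-- ===== Notes on version B (the rewrite author's own statement) =====
-- stated objective: alternative
-- what changed: A's per-cell recursive four-direction DFS is replaced by splitting every row and column at '#' into maximal segments and matching each segment against the word forwards or backwards.
-- outside the precondition, e.g. on placeWordInCrossword([[]], ''): A returns False, B returns True; on placeWordInCrossword([['a', 'b'], ['x']], 'ab'): A returns True, B returns True; on placeWordInCrossword([[' ']], ''): A returns False, B returns False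
import Mathlib
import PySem

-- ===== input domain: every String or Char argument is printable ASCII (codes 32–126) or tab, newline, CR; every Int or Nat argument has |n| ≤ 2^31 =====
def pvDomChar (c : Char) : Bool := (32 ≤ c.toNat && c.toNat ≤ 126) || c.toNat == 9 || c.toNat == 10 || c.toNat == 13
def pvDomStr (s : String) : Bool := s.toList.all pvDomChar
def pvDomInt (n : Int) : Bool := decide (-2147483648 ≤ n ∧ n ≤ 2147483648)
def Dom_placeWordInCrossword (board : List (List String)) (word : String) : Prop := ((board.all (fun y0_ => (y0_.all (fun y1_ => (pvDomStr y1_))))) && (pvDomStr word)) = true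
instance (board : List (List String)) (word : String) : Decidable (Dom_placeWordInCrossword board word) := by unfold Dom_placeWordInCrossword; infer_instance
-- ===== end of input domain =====

-- B replaces A's recursive four-direction DFS by splitting each row and column at '#'
-- into maximal segments and matching each segment against the word forwards or backwards
-- (objective: alternative algorithm; equal return value proved below).


-- ===== PORT A =====
-- board[r][c] as a total function: out-of-range gives "" (only ever read behind the
-- boundary test of the Python, so the default is never observed on admitted inputs).
def pvCell (board : List (List String)) (r c : Int) : String :=
  ((PySem.List.pyGet? ((PySem.List.pyGet? board r).getD []) c)).getD ""

def pvMove : List (Int × Int) := [(0,1), (1,0), (-1,0), (0,-1)]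

def pvDfs (board : List (List String)) (w : List Char) (m n : Int) :
    Nat → Int × Int → Option (Int × Int) → Nat → Bool
  | 0, _, _, _ => false
  | fuel+1, pos, direction, wordIdx =>
    let isBoundary := decide (pos.1 < 0) || decide (pos.1 > m - 1) || decide (pos.2 < 0) ||
      decide (pos.2 > n - 1) || (pvCell board pos.1 pos.2 == "#")
    if wordIdx == w.length then isBoundary
    else if isBoundary || (pvCell board pos.1 pos.2 != " " &&
        pvCell board pos.1 pos.2 != String.ofList [w.getD wordIdx ' ']) then false
    else
      match direction with
      | none =>
        pvMove.any fun d =>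
          let prev := (pos.1 - d.1, pos.2 - d.2)
          if decide (0 ≤ prev.1) && decide (prev.1 < m) && decide (0 ≤ prev.2) &&
              decide (prev.2 < n) && (pvCell board prev.1 prev.2 != "#") then false
          else pvDfs board w m n fuel (pos.1 + d.1, pos.2 + d.2) (some d) (wordIdx + 1)
      | some d => pvDfs board w m n fuel (pos.1 + d.1, pos.2 + d.2) (some d) (wordIdx + 1)

def placeWordInCrossword (board : List (List String)) (word : String) : Bool :=
  let m : Int := board.length
  let n : Int := (((PySem.List.pyGet? board 0).getD []).length : Int)
  let w := word.toList
  (PySem.List.pyRange 0 m 1).any fun i =>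
    (PySem.List.pyRange 0 n 1).any fun j =>
      if pvCell board i j == " " || pvCell board i j == String.ofList [w.getD 0 ' '] then
        pvDfs board w m n (w.length + 1) (i, j) none 0
      else false

-- ===== PORT B =====
def pvCompat (seg : List String) (v : List Char) : Bool :=
  (seg.zip v).all fun cw => cw.1 == " " || cw.1 == String.ofList [cw.2]

def pvGood (w rev : List Char) (seg : List String) : Bool :=
  if seg.length != w.length then false
  else pvCompat seg w || pvCompat seg rev

def pvScanLine (w rev : List Char) (line : List String) : Bool :=
  ((line ++ ["#"]).foldl (fun (st : List String × Bool) cell =>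
      if cell == "#" then ([], st.2 || pvGood w rev st.1)
      else (st.1 ++ [cell], st.2)) ([], false)).2

-- zip(*grid): the list of columns; exact on the rectangular grid built below
def pvColumns (board : List (List String)) (n : Nat) : List (List String) :=
  (List.range n).map fun j => board.map fun row => row.getD j ""

def placeWordInCrossword_alt (board : List (List String)) (word : String) : Bool :=
  let n := (board.headD []).length            -- len(board[0]); Pre_ gives board ≠ []
  let grid := board.map (fun row => row.take n)
  let w := word.toList
  let rev := w.reverse
  let lines := grid ++ pvColumns grid n
  lines.any (pvScanLine w rev)

-- ===== PRECONDITION & SPEC =====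
-- Pre_ excludes: the empty board and (unless every cell is blank) the empty word, on which A
-- raises IndexError, and boards with a row shorter than row 0, on which A raises IndexError
-- whenever such a row is reached and otherwise returns whatever the truncated scan found.
def Pre_placeWordInCrossword (board : List (List String)) (word : String) : Prop :=
  board ≠ [] ∧ word ≠ "" ∧ ∀ row ∈ board, (board.headD []).length ≤ row.length
instance (board : List (List String)) (word : String) : Decidable (Pre_placeWordInCrossword board word) := by unfold Pre_placeWordInCrossword; infer_instance

def pvWitness_placeWordInCrossword : List (List String) × String := ([[" ", "a"], ["b", "#"]], "ab")

def Spec_placeWordInCrossword (board : List (List String)) (word : String) (out : Bool) : Prop := out = placeWordInCrossword_alt board word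
instance (board : List (List String)) (word : String) (out : Bool) : Decidable (Spec_placeWordInCrossword board word out) := by unfold Spec_placeWordInCrossword; infer_instance

-- ===== CLAIM (what is proved, stated in full; the proofs are below) =====
def Claim_equal_placeWordInCrossword : Prop := ∀ (board : List (List String)) (word : String), Dom_placeWordInCrossword board word → Pre_placeWordInCrossword board word → Spec_placeWordInCrossword board word (placeWordInCrossword board word)

-- ===== LEMMAS AND PROOFS =====

-- proof-layer: recursive form of the splitting
def segsR : List String → List (List String)
  | [] => [[]]
  | c :: t =>
    if c = "#" then [] :: segsR t
    else match segsR t with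
      | [] => [[c]]
      | s :: ss => (c :: s) :: ss

def consPrefix (cur : List String) : List (List String) → List (List String)
  | [] => [cur]
  | s :: ss => (cur ++ s) :: ss

theorem segsR_ne_nil (ℓ : List String) : segsR ℓ ≠ [] := by
  cases ℓ with
  | nil => simp [segsR]
  | cons c t =>
    simp only [segsR]
    split
    · simp
    · split <;> simp

theorem foldl_scan_inv (w rev : List Char) (ℓ : List String) :
    ∀ (cur : List String) (acc : Bool),
    ((ℓ ++ ["#"]).foldl (fun (st : List String × Bool) cell =>
      if cell == "#" then ([], st.2 || pvGood w rev st.1)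
      else (st.1 ++ [cell], st.2)) (cur, acc)).2
    = (acc || (consPrefix cur (segsR ℓ)).any (pvGood w rev)) := by
  induction ℓ with
  | nil =>
    intro cur acc
    simp [consPrefix, segsR, List.foldl]
  | cons c t ih =>
    intro cur acc
    by_cases hc : c = "#"
    · subst hc
      simp only [List.cons_append, List.foldl_cons, beq_self_eq_true, if_pos]
      rw [ih]
      rcases h : segsR t with _ | ⟨s, ss⟩
      · exact absurd h (segsR_ne_nil t)
      · simp [segsR, consPrefix, h, Bool.or_assoc]
    · have hcb : (c == "#") = false := by simp [hc]
      simp only [List.cons_append, List.foldl_cons, hcb, Bool.false_eq_true, if_false]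
      rw [ih]
      rcases h : segsR t with _ | ⟨s, ss⟩
      · exact absurd h (segsR_ne_nil t)
      · simp [segsR, consPrefix, h, hc]

theorem scanLine_eq_segsR (w rev : List Char) (ℓ : List String) :
    pvScanLine w rev ℓ = (segsR ℓ).any (pvGood w rev) := by
  unfold pvScanLine
  rw [foldl_scan_inv]
  rcases h : segsR ℓ with _ | ⟨s, ss⟩
  · exact absurd h (segsR_ne_nil ℓ)
  · simp [consPrefix]

-- SegAt ℓ a seg: seg is the maximal '#'-free run of ℓ starting at index a
def SegAt (ℓ : List String) (a : Nat) (seg : List String) : Prop :=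
  a + seg.length ≤ ℓ.length ∧
  (a = 0 ∨ ℓ.getD (a - 1) "" = "#") ∧
  (a + seg.length = ℓ.length ∨ ℓ.getD (a + seg.length) "" = "#") ∧
  (∀ t, t < seg.length → ℓ.getD (a + t) "" = seg.getD t "" ∧ seg.getD t "" ≠ "#")

theorem segAt_shift (c : String) (t : List String) (a : Nat) (seg : List String) :
    SegAt (c :: t) (a + 1) seg ↔ SegAt t a seg ∧ (a = 0 → c = "#") := by
  unfold SegAt
  have hlen : (c :: t).length = t.length + 1 := by simp
  have hsh : ∀ x, (c :: t).getD (a + 1 + x) "" = t.getD (a + x) "" := by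
    intro x
    have e : a + 1 + x = (a + x) + 1 := by omega
    rw [e]; exact List.getD_cons_succ ..
  constructor
  · rintro ⟨h1, h2, h3, h4⟩
    have h2' : (c :: t).getD a "" = "#" := by
      rcases h2 with h | h
      · omega
      · simpa using h
    refine ⟨⟨by rw [hlen] at h1; omega, ?_, ?_, ?_⟩, ?_⟩
    · rcases a with _ | a''
      · exact Or.inl rfl
      · exact Or.inr (by simpa [List.getD_cons_succ] using h2')
    · rcases h3 with h | h
      · left; rw [hlen] at h; omega
      · exact Or.inr ((hsh seg.length).symm.trans h)
    · intro x hx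
      have := h4 x hx
      rw [hsh x] at this
      exact this
    · rintro rfl
      simpa using h2'
  · rintro ⟨⟨h1, h2, h3, h4⟩, h5⟩
    refine ⟨by rw [hlen]; omega, ?_, ?_, ?_⟩
    · right
      have e : a + 1 - 1 = a := by omega
      rw [e]
      rcases a with _ | a''
      · simpa using h5 rfl
      · rcases h2 with h | h
        · omega
        · simpa [List.getD_cons_succ] using h
    · rcases h3 with h | h
      · left; rw [hlen]; omega
      · exact Or.inr ((hsh seg.length).trans h)
    · intro x hx
      rw [hsh x]
      exact h4 x hx

theorem segsR_char (ℓ : List String) :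
    ∃ s ss, segsR ℓ = s :: ss ∧
      (∀ seg, seg = s ↔ SegAt ℓ 0 seg) ∧
      (∀ seg, seg ∈ ss ↔ ∃ a, 0 < a ∧ SegAt ℓ a seg) := by
  induction ℓ with
  | nil =>
    refine ⟨[], [], rfl, ?_, ?_⟩
    · intro seg
      constructor
      · rintro rfl; exact ⟨by simp, Or.inl rfl, by simp, by simp⟩
      · rintro ⟨h1, _, _, _⟩
        simp only [List.length_nil] at h1
        exact List.length_eq_zero_iff.mp (by omega)
    · intro seg
      simp only [List.not_mem_nil, false_iff, not_exists]
      rintro a ⟨ha, h1, _, _, _⟩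
      simp only [List.length_nil] at h1
      omega
  | cons c t ih =>
    obtain ⟨s', ss', hseg, hhead, htail⟩ := ih
    by_cases hc : c = "#"
    · subst hc
      refine ⟨[], segsR t, by simp [segsR], ?_, ?_⟩
      · intro seg
        constructor
        · rintro rfl
          exact ⟨by simp, Or.inl rfl, Or.inr (by simp [List.getD]), by simp⟩
        · rintro ⟨h1, h2, h3, h4⟩
          rcases seg with _ | ⟨x, xs⟩
          · rfl
          · exfalso
            have := h4 0 (by simp)
            simp [List.getD] at this
            exact this.2 this.1.symm
      · intro seg
        rw [hseg]
        constructor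
        · intro hm
          have : seg = s' ∨ seg ∈ ss' := by simpa using hm
          rcases this with h | h
          · exact ⟨1, by omega, (segAt_shift _ _ 0 seg).mpr ⟨(hhead seg).mp h, fun _ => rfl⟩⟩
          · obtain ⟨a, ha, hsa⟩ := (htail seg).mp h
            exact ⟨a + 1, by omega, (segAt_shift _ _ a seg).mpr ⟨hsa, fun h0 => by omega⟩⟩
        · rintro ⟨a, ha, hsa⟩
          rcases a with _ | a'
          · omega
          · have := (segAt_shift _ _ a' seg).mp hsa
            rcases a' with _ | a''
            · exact List.mem_cons.mpr (Or.inl ((hhead seg).mpr this.1))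
            · exact List.mem_cons.mpr (Or.inr ((htail seg).mpr ⟨a'' + 1, by omega, this.1⟩))
    · refine ⟨c :: s', ss', by simp [segsR, hc, hseg], ?_, ?_⟩
      · intro seg
        have hs' : SegAt t 0 s' := (hhead s').mp rfl
        obtain ⟨hs1, _, hs3, hs4⟩ := hs'
        constructor
        · rintro rfl
          refine ⟨by simp; omega, Or.inl rfl, ?_, ?_⟩
          · rcases hs3 with h | h
            · left; simp; omega
            · right
              have e : 0 + (c :: s').length = (0 + s'.length) + 1 := by simp
              rw [e, List.getD_cons_succ]
              exact h
          · intro x hx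
            rcases x with _ | x'
            · exact ⟨by simp [List.getD], by simpa [List.getD] using hc⟩
            · have := hs4 x' (by simpa using hx)
              have e : 0 + (x' + 1) = (0 + x') + 1 := by omega
              rw [e, List.getD_cons_succ]
              exact ⟨this.1, this.2⟩
        · rintro ⟨h1, h2, h3, h4⟩
          rcases seg with _ | ⟨x, xs⟩
          · exfalso
            rcases h3 with h | h
            · simp at h
            · simp [List.getD] at h
              exact hc h
          · have hx0 := h4 0 (by simp)
            simp only [Nat.add_zero, List.getD] at hx0
            have hxc : x = c := by
              have : (c :: t)[0]?.getD "" = x := by simpa using hx0.1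
              simpa using this.symm
            have hxs : SegAt t 0 xs := by
              refine ⟨by simp at h1; omega, Or.inl rfl, ?_, ?_⟩
              · rcases h3 with h | h
                · left; simp at h; omega
                · right
                  have e : 0 + (x :: xs).length = (0 + xs.length) + 1 := by simp
                  rw [e, List.getD_cons_succ] at h
                  exact h
              · intro y hy
                have := h4 (y + 1) (by simpa using Nat.succ_lt_succ hy)
                have e : 0 + (y + 1) = (0 + y) + 1 := by omega
                rw [e, List.getD_cons_succ] at this
                simpa [List.getD_cons_succ] using this
            have : xs = s' := (hhead xs).mpr hxs
            rw [hxc, this]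
      · intro seg
        rw [htail seg]
        constructor
        · rintro ⟨a, ha, hsa⟩
          exact ⟨a + 1, by omega, (segAt_shift _ _ a seg).mpr ⟨hsa, fun h0 => by omega⟩⟩
        · rintro ⟨a, ha, hsa⟩
          rcases a with _ | a'
          · omega
          · have := (segAt_shift _ _ a' seg).mp hsa
            rcases a' with _ | a''
            · exact absurd (this.2 rfl) hc
            · exact ⟨a'' + 1, by omega, this.1⟩

theorem mem_segsR_iff (ℓ : List String) (seg : List String) :
    seg ∈ segsR ℓ ↔ ∃ a, SegAt ℓ a seg := by
  obtain ⟨s, ss, hseg, hhead, htail⟩ := segsR_char ℓ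
  rw [hseg]
  constructor
  · intro hm
    rcases List.mem_cons.mp hm with h | h
    · exact ⟨0, (hhead seg).mp h⟩
    · obtain ⟨a, _, hsa⟩ := (htail seg).mp h
      exact ⟨a, hsa⟩
  · rintro ⟨a, hsa⟩
    rcases a with _ | a'
    · exact List.mem_cons.mpr (Or.inl ((hhead seg).mpr hsa))
    · exact List.mem_cons.mpr (Or.inr ((htail seg).mpr ⟨a' + 1, by omega, hsa⟩))

-- LineFit v ℓ a: a maximal segment of exactly v's length starts at a and matches v
def LineFit (v : List Char) (ℓ : List String) (a : Nat) : Prop :=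
  a + v.length ≤ ℓ.length ∧
  (a = 0 ∨ ℓ.getD (a - 1) "" = "#") ∧
  (a + v.length = ℓ.length ∨ ℓ.getD (a + v.length) "" = "#") ∧
  ∀ t, t < v.length → ℓ.getD (a + t) "" ≠ "#" ∧
    (ℓ.getD (a + t) "" = " " ∨ ℓ.getD (a + t) "" = String.ofList [v.getD t ' '])

theorem compat_iff (seg : List String) (v : List Char) (h : seg.length = v.length) :
    pvCompat seg v = true ↔
      ∀ t, t < v.length → (seg.getD t "" = " " ∨ seg.getD t "" = String.ofList [v.getD t ' ']) := by
  induction seg generalizing v with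
  | nil =>
    have : v = [] := by
      have h0 : v.length = 0 := by simpa using h.symm
      exact List.length_eq_zero_iff.mp h0
    subst this
    simp [pvCompat]
  | cons x xs ih =>
    rcases v with _ | ⟨y, ys⟩
    · simp at h
    · have hlen : xs.length = ys.length := by simpa using h
      constructor
      · intro hall t ht
        have hx : (x == " " || x == String.ofList [y]) = true ∧ pvCompat xs ys = true := by
          simpa [pvCompat, List.zip_cons_cons] using hall
        rcases t with _ | t'
        · simpa [List.getD] using hx.1
        · have := (ih ys hlen).mp hx.2 t' (by simpa using ht)
          simpa [List.getD_cons_succ] using this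
      · intro hp
        have h0 := hp 0 (by simp)
        have hr : ∀ t, t < ys.length →
            (xs.getD t "" = " " ∨ xs.getD t "" = String.ofList [ys.getD t ' ']) := by
          intro t ht
          have := hp (t + 1) (by simpa using Nat.succ_lt_succ ht)
          simpa [List.getD_cons_succ] using this
        have := (ih ys hlen).mpr hr
        simp only [List.getD] at h0
        simp [pvCompat, List.zip_cons_cons] at this ⊢
        constructor
        · rcases h0 with h | h
          · left; exact h
          · right; simpa using h
        · exact this

theorem good_iff (w rev : List Char) (hrl : rev.length = w.length) (seg : List String) :
    pvGood w rev seg = true ↔ seg.length = w.length ∧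
      ((∀ t, t < w.length → (seg.getD t "" = " " ∨ seg.getD t "" = String.ofList [w.getD t ' '])) ∨
       (∀ t, t < rev.length → (seg.getD t "" = " " ∨ seg.getD t "" = String.ofList [rev.getD t ' ']))) := by
  unfold pvGood
  by_cases hl : seg.length = w.length
  · rw [if_neg (by simp [hl])]
    simp only [Bool.or_eq_true, hl, true_and]
    rw [compat_iff seg w hl, compat_iff seg rev (by omega)]
  · rw [if_pos (by simpa using hl)]
    simp [hl]

theorem lineSeg_getD (ℓ : List String) (a L t : Nat) (_hL : a + L ≤ ℓ.length) (ht : t < L) :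
    ((ℓ.drop a).take L).getD t "" = ℓ.getD (a + t) "" := by
  rw [List.getD, List.getD]
  rw [List.getElem?_take_of_lt ht, List.getElem?_drop]

theorem scanLine_iff (w rev : List Char) (hrl : rev.length = w.length) (ℓ : List String) :
    pvScanLine w rev ℓ = true ↔ ∃ a, LineFit w ℓ a ∨ LineFit rev ℓ a := by
  rw [scanLine_eq_segsR, List.any_eq_true]
  constructor
  · rintro ⟨seg, hmem, hgood⟩
    obtain ⟨a, hsa⟩ := (mem_segsR_iff ℓ seg).mp hmem
    obtain ⟨hlen, hcomp⟩ := (good_iff w rev hrl seg).mp hgood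
    obtain ⟨s1, s2, s3, s4⟩ := hsa
    refine ⟨a, ?_⟩
    rcases hcomp with hcw | hcr
    · left
      refine ⟨by omega, s2, by rw [← hlen]; exact s3, ?_⟩
      intro t ht
      have h4 := s4 t (by omega)
      rw [h4.1]
      exact ⟨h4.2, hcw t ht⟩
    · right
      refine ⟨by omega, s2, by rw [hrl, ← hlen]; exact s3, ?_⟩
      intro t ht
      have h4 := s4 t (by omega)
      rw [h4.1]
      exact ⟨h4.2, hcr t ht⟩
  · rintro ⟨a, hfit⟩
    have key : ∀ v : List Char, v.length = w.length → LineFit v ℓ a →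
        ∃ seg ∈ segsR ℓ, seg.length = w.length ∧
          ∀ t, t < v.length → (seg.getD t "" = " " ∨ seg.getD t "" = String.ofList [v.getD t ' ']) := by
      rintro v hvl ⟨f1, f2, f3, f4⟩
      refine ⟨(ℓ.drop a).take v.length, ?_, ?_, ?_⟩
      · apply (mem_segsR_iff ℓ _).mpr
        refine ⟨a, ?_, ?_, ?_, ?_⟩
        · simp only [List.length_take, List.length_drop]
          omega
        · exact f2
        · simpa only [List.length_take, List.length_drop,
            min_eq_left (by omega : v.length ≤ ℓ.length - a)] using f3
        · intro t ht
          simp only [List.length_take, List.length_drop] at ht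
          have ht' : t < v.length := by omega
          rw [lineSeg_getD ℓ a v.length t f1 ht']
          exact ⟨rfl, (f4 t ht').1⟩
      · simp only [List.length_take, List.length_drop]; omega
      · intro t ht
        rw [lineSeg_getD ℓ a v.length t f1 ht]
        exact (f4 t ht).2
    rcases hfit with hf | hf
    · obtain ⟨seg, hmem, hlen, hpt⟩ := key w rfl hf
      exact ⟨seg, hmem, (good_iff w rev hrl seg).mpr ⟨hlen, Or.inl hpt⟩⟩
    · obtain ⟨seg, hmem, hlen, hpt⟩ := key rev hrl hf
      exact ⟨seg, hmem, (good_iff w rev hrl seg).mpr ⟨hlen, Or.inr hpt⟩⟩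

def Blk (R : List (List String)) (m n : Int) (r c : Int) : Prop :=
  r < 0 ∨ r > m - 1 ∨ c < 0 ∨ c > n - 1 ∨ pvCell R r c = "#"

def OkAt (R : List (List String)) (m n : Int) (r c : Int) (ch : Char) : Prop :=
  ¬ Blk R m n r c ∧ (pvCell R r c = " " ∨ pvCell R r c = String.ofList [ch])

def DFit (R : List (List String)) (m n : Int) (w : List Char) (r c : Int) (d : Int × Int) : Prop :=
  Blk R m n (r - d.1) (c - d.2) ∧
  Blk R m n (r + (w.length : Int) * d.1) (c + (w.length : Int) * d.2) ∧
  ∀ t : Nat, t < w.length → OkAt R m n (r + (t : Int) * d.1) (c + (t : Int) * d.2) (w.getD t ' ')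

theorem isB_iff (R : List (List String)) (m n r c : Int) :
    (decide (r < 0) || decide (r > m - 1) || decide (c < 0) ||
      decide (c > n - 1) || (pvCell R r c == "#")) = true ↔ Blk R m n r c := by
  simp [Blk, or_assoc]

theorem okAt_cond (R : List (List String)) (m n r c : Int) (ch : Char) :
    ((decide (r < 0) || decide (r > m - 1) || decide (c < 0) ||
      decide (c > n - 1) || (pvCell R r c == "#")) ||
     (pvCell R r c != " " && pvCell R r c != String.ofList [ch])) = false ↔
      OkAt R m n r c ch := by
  rw [Bool.or_eq_false_iff]
  unfold OkAt
  have e1 : ((decide (r < 0) || decide (r > m - 1) || decide (c < 0) ||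
      decide (c > n - 1) || (pvCell R r c == "#")) = false) ↔ ¬ Blk R m n r c := by
    rw [← isB_iff R m n r c]
    simp
  have e2 : ((pvCell R r c != " " && pvCell R r c != String.ofList [ch]) = false) ↔
      (pvCell R r c = " " ∨ pvCell R r c = String.ofList [ch]) := by
    simp only [Bool.and_eq_false_iff, bne_eq_false_iff_eq]
  rw [e1, e2]

theorem forall_lt_succ_shift {P : Nat → Prop} {s : Nat} :
    (∀ t, t < s + 1 → P t) ↔ P 0 ∧ ∀ t, t < s → P (t + 1) :=
  ⟨fun h => ⟨h 0 (by omega), fun t ht => h (t + 1) (by omega)⟩,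
   fun h t ht => match t with
     | 0 => h.1
     | t' + 1 => h.2 t' (by omega)⟩

theorem pvDfs_succ (R : List (List String)) (w : List Char) (m n : Int)
    (fuel : Nat) (r c : Int) (dir : Option (Int × Int)) (k : Nat) :
    pvDfs R w m n (fuel + 1) (r, c) dir k =
    (let isB := decide (r < 0) || decide (r > m - 1) || decide (c < 0) ||
        decide (c > n - 1) || (pvCell R r c == "#")
     if k == w.length then isB
     else if isB || (pvCell R r c != " " &&
        pvCell R r c != String.ofList [w.getD k ' ']) then false
     else
       match dir with
       | none =>
         pvMove.any fun d =>
           if decide (0 ≤ r - d.1) && decide (r - d.1 < m) && decide (0 ≤ c - d.2) &&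
               decide (c - d.2 < n) && (pvCell R (r - d.1) (c - d.2) != "#") then false
           else pvDfs R w m n fuel (r + d.1, c + d.2) (some d) (k + 1)
       | some d => pvDfs R w m n fuel (r + d.1, c + d.2) (some d) (k + 1)) := rfl

theorem dfs_some_iff (R : List (List String)) (w : List Char) (m n : Int) (d : Int × Int) :
    ∀ (fuel k : Nat) (r c : Int), k ≤ w.length → w.length - k < fuel →
    (pvDfs R w m n fuel (r, c) (some d) k = true ↔
      ((∀ t : Nat, t < w.length - k →
          OkAt R m n (r + (t : Int) * d.1) (c + (t : Int) * d.2) (w.getD (k + t) ' ')) ∧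
       Blk R m n (r + ((w.length - k : Nat) : Int) * d.1) (c + ((w.length - k : Nat) : Int) * d.2))) := by
  intro fuel
  induction fuel with
  | zero => intro k r c hk hf; omega
  | succ fuel ih =>
    intro k r c hk hf
    rw [pvDfs_succ]
    by_cases hkL : k = w.length
    · subst hkL
      simp only [beq_self_eq_true, if_pos]
      have e : w.length - w.length = 0 := by omega
      rw [e]
      simp only [Nat.cast_zero, zero_mul, add_zero]
      constructor
      · intro h
        exact ⟨by omega, (isB_iff R m n r c).mp h⟩
      · rintro ⟨_, h⟩
        exact (isB_iff R m n r c).mpr h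
    · have hkb : (k == w.length) = false := by simp [hkL]
      rw [hkb]
      simp only [Bool.false_eq_true, if_false]
      cases hcond : ((decide (r < 0) || decide (r > m - 1) || decide (c < 0) ||
          decide (c > n - 1) || (pvCell R r c == "#")) ||
          (pvCell R r c != " " && pvCell R r c != String.ofList [w.getD k ' '])) with
      | true =>
        have hok : ¬ OkAt R m n r c (w.getD k ' ') := by
          intro hok
          rw [(okAt_cond R m n r c (w.getD k ' ')).mpr hok] at hcond
          exact Bool.false_ne_true hcond
        rw [if_pos rfl]
        simp only [Bool.false_eq_true, false_iff, not_and]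
        intro h1
        exfalso
        apply hok
        have := h1 0 (by omega)
        simpa using this
      | false =>
        have hok : OkAt R m n r c (w.getD k ' ') := (okAt_cond R m n r c (w.getD k ' ')).mp hcond
        rw [if_neg (by simp)]
        rw [ih (k + 1) (r + d.1) (c + d.2) (by omega) (by omega)]
        have hsplit : w.length - k = (w.length - (k + 1)) + 1 := by omega
        constructor
        · rintro ⟨h1, h2⟩
          constructor
          · rw [hsplit]
            refine (forall_lt_succ_shift (P := fun t => OkAt R m n (r + (t : Int) * d.1)
              (c + (t : Int) * d.2) (w.getD (k + t) ' ')) (s := w.length - (k + 1))).mpr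
              ⟨by simpa using hok, ?_⟩
            intro t ht
            have hthis := h1 t ht
            have e1 : r + d.1 + (t : Int) * d.1 = r + ((t + 1 : Nat) : Int) * d.1 := by
              push_cast; ring
            have e2 : c + d.2 + (t : Int) * d.2 = c + ((t + 1 : Nat) : Int) * d.2 := by
              push_cast; ring
            rw [e1, e2] at hthis
            have e3 : k + (t + 1) = k + 1 + t := by omega
            rw [e3]
            exact hthis
          · have e1 : r + ((w.length - k : Nat) : Int) * d.1
                = r + d.1 + ((w.length - (k + 1) : Nat) : Int) * d.1 := by
              rw [hsplit]; push_cast; ring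
            have e2 : c + ((w.length - k : Nat) : Int) * d.2
                = c + d.2 + ((w.length - (k + 1) : Nat) : Int) * d.2 := by
              rw [hsplit]; push_cast; ring
            rw [e1, e2]
            exact h2
        · rintro ⟨h1, h2⟩
          rw [hsplit] at h1
          have hs := (forall_lt_succ_shift (P := fun t => OkAt R m n (r + (t : Int) * d.1)
            (c + (t : Int) * d.2) (w.getD (k + t) ' ')) (s := w.length - (k + 1))).mp h1
          constructor
          · intro t ht
            have hthis := hs.2 t ht
            have e1 : r + ((t + 1 : Nat) : Int) * d.1 = r + d.1 + (t : Int) * d.1 := by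
              push_cast; ring
            have e2 : c + ((t + 1 : Nat) : Int) * d.2 = c + d.2 + (t : Int) * d.2 := by
              push_cast; ring
            rw [e1, e2] at hthis
            have e3 : k + (t + 1) = k + 1 + t := by omega
            rw [e3] at hthis
            exact hthis
          · have e1 : r + ((w.length - k : Nat) : Int) * d.1
                = r + d.1 + ((w.length - (k + 1) : Nat) : Int) * d.1 := by
              rw [hsplit]; push_cast; ring
            have e2 : c + ((w.length - k : Nat) : Int) * d.2
                = c + d.2 + ((w.length - (k + 1) : Nat) : Int) * d.2 := by
              rw [hsplit]; push_cast; ring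
            rw [e1, e2] at h2
            exact h2

theorem prevOpen_iff (R : List (List String)) (m n p1 p2 : Int) :
    (decide (0 ≤ p1) && decide (p1 < m) && decide (0 ≤ p2) &&
      decide (p2 < n) && (pvCell R p1 p2 != "#")) = false ↔ Blk R m n p1 p2 := by
  rw [← Bool.not_eq_true]
  simp only [Bool.and_eq_true, decide_eq_true_eq, bne_iff_ne, ne_eq]
  unfold Blk
  constructor
  · intro h
    by_cases h1 : p1 < 0
    · exact Or.inl h1
    by_cases h2 : p1 > m - 1
    · exact Or.inr (Or.inl h2)
    by_cases h3 : p2 < 0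
    · exact Or.inr (Or.inr (Or.inl h3))
    by_cases h4 : p2 > n - 1
    · exact Or.inr (Or.inr (Or.inr (Or.inl h4)))
    refine Or.inr (Or.inr (Or.inr (Or.inr ?_)))
    by_contra hc
    exact h ⟨⟨⟨⟨by omega, by omega⟩, by omega⟩, by omega⟩, hc⟩
  · rintro (h | h | h | h | h) ⟨⟨⟨⟨a1, a2⟩, a3⟩, a4⟩, a5⟩
    · omega
    · omega
    · omega
    · omega
    · exact a5 h

theorem dfit_split (R : List (List String)) (m n : Int) (w : List Char)
    (r c : Int) (d : Int × Int) (hw : w ≠ []) :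
    DFit R m n w r c d ↔
      Blk R m n (r - d.1) (c - d.2) ∧
      OkAt R m n r c (w.getD 0 ' ') ∧
      ((∀ t : Nat, t < w.length - 1 →
          OkAt R m n ((r + d.1) + (t : Int) * d.1) ((c + d.2) + (t : Int) * d.2) (w.getD (1 + t) ' ')) ∧
       Blk R m n ((r + d.1) + ((w.length - 1 : Nat) : Int) * d.1)
                 ((c + d.2) + ((w.length - 1 : Nat) : Int) * d.2)) := by
  have hL : 1 ≤ w.length := by
    cases w with
    | nil => exact absurd rfl hw
    | cons x xs => simp
  have hsplit : w.length = (w.length - 1) + 1 := by omega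
  have hc1 : ((w.length - 1 : Nat) : Int) = (w.length : Int) - 1 := by omega
  have eB1 : r + (w.length : Int) * d.1 = (r + d.1) + ((w.length - 1 : Nat) : Int) * d.1 := by
    rw [hc1]; ring
  have eB2 : c + (w.length : Int) * d.2 = (c + d.2) + ((w.length - 1 : Nat) : Int) * d.2 := by
    rw [hc1]; ring
  unfold DFit
  constructor
  · rintro ⟨h1, h2, h3⟩
    refine ⟨h1, by simpa using h3 0 (by omega), ?_, ?_⟩
    · intro t ht
      have hthis := h3 (t + 1) (by omega)
      have e1 : r + ((t + 1 : Nat) : Int) * d.1 = (r + d.1) + (t : Int) * d.1 := by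
        push_cast; ring
      have e2 : c + ((t + 1 : Nat) : Int) * d.2 = (c + d.2) + (t : Int) * d.2 := by
        push_cast; ring
      rw [e1, e2] at hthis
      have e3 : (t + 1 : Nat) = 1 + t := by omega
      rw [e3] at hthis
      exact hthis
    · rw [← eB1, ← eB2]
      exact h2
  · rintro ⟨h1, h0, h2, h3⟩
    refine ⟨h1, by rw [eB1, eB2]; exact h3, ?_⟩
    intro t ht
    rcases t with _ | t'
    · simpa using h0
    · have hthis := h2 t' (by omega)
      have e1 : (r + d.1) + (t' : Int) * d.1 = r + ((t' + 1 : Nat) : Int) * d.1 := by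
        push_cast; ring
      have e2 : (c + d.2) + (t' : Int) * d.2 = c + ((t' + 1 : Nat) : Int) * d.2 := by
        push_cast; ring
      rw [e1, e2] at hthis
      have e3 : (1 + t' : Nat) = t' + 1 := by omega
      rw [e3] at hthis
      exact hthis

theorem A_iff (R : List (List String)) (word : String) (hw : word.toList ≠ []) :
    placeWordInCrossword R word = true ↔
      ∃ d ∈ pvMove, ∃ r c : Int,
        DFit R (R.length : Int) (((PySem.List.pyGet? R 0).getD []).length : Int)
          word.toList r c d := by
  set m : Int := (R.length : Int) with hm
  set n : Int := (((PySem.List.pyGet? R 0).getD []).length : Int) with hn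
  set w : List Char := word.toList with hwdef
  have hL : 1 ≤ w.length := by
    cases hwl : w with
    | nil => exact absurd hwl hw
    | cons x xs => simp
  have inner : ∀ r c : Int,
      (pvDfs R w m n (w.length + 1) (r, c) none 0 = true) ↔
        ∃ d ∈ pvMove, DFit R m n w r c d := by
    intro r c
    rw [pvDfs_succ]
    have h0L : (0 == w.length) = false := by
      simp; omega
    rw [h0L]
    simp only [Bool.false_eq_true, if_false]
    cases hcond : ((decide (r < 0) || decide (r > m - 1) || decide (c < 0) ||
        decide (c > n - 1) || (pvCell R r c == "#")) ||
        (pvCell R r c != " " && pvCell R r c != String.ofList [w.getD 0 ' '])) with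
    | true =>
      have hok : ¬ OkAt R m n r c (w.getD 0 ' ') := by
        intro hok
        rw [(okAt_cond R m n r c (w.getD 0 ' ')).mpr hok] at hcond
        exact Bool.false_ne_true hcond
      rw [if_pos rfl]
      simp only [Bool.false_eq_true, false_iff, not_exists]
      intro d hdf
      rcases hdf with ⟨hd, hfit⟩
      exact hok (by simpa using hfit.2.2 0 (by omega))
    | false =>
      have hok : OkAt R m n r c (w.getD 0 ' ') := (okAt_cond R m n r c (w.getD 0 ' ')).mp hcond
      rw [if_neg (by simp)]
      rw [List.any_eq_true]
      constructor
      · rintro ⟨d, hd, hif⟩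
        refine ⟨d, hd, ?_⟩
        rcases hpo : (decide (0 ≤ r - d.1) && decide (r - d.1 < m) && decide (0 ≤ c - d.2) &&
            decide (c - d.2 < n) && (pvCell R (r - d.1) (c - d.2) != "#")) with _ | _
        · rw [hpo] at hif
          rw [if_neg (by simp)] at hif
          rw [dfs_some_iff R w m n d w.length 1 (r + d.1) (c + d.2) (by omega) (by omega)] at hif
          rw [dfit_split R m n w r c d (by intro hnil; rw [hnil] at hL; simp at hL)]
          exact ⟨(prevOpen_iff R m n (r - d.1) (c - d.2)).mp hpo, hok, hif⟩
        · rw [hpo] at hif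
          rw [if_pos rfl] at hif
          exact absurd hif (by simp)
      · rintro ⟨d, hd, hfit⟩
        refine ⟨d, hd, ?_⟩
        rw [dfit_split R m n w r c d (by intro hnil; rw [hnil] at hL; simp at hL)] at hfit
        obtain ⟨hprev, _, hrest⟩ := hfit
        rw [← prevOpen_iff R m n (r - d.1) (c - d.2)] at hprev
        rw [hprev]
        rw [if_neg (by simp)]
        rw [dfs_some_iff R w m n d w.length 1 (r + d.1) (c + d.2) (by omega) (by omega)]
        exact hrest
  show ((PySem.List.pyRange 0 m 1).any fun i =>
      (PySem.List.pyRange 0 n 1).any fun j =>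
        if pvCell R i j == " " || pvCell R i j == String.ofList [w.getD 0 ' '] then
          pvDfs R w m n (w.length + 1) (i, j) none 0
        else false) = true ↔ _
  rw [List.any_eq_true]
  constructor
  · rintro ⟨i, hi, hin⟩
    rw [List.any_eq_true] at hin
    obtain ⟨j, hj, hif⟩ := hin
    rcases hflt : (pvCell R i j == " " || pvCell R i j == String.ofList [w.getD 0 ' ']) with _ | _
    · rw [hflt, if_neg (by simp)] at hif
      exact absurd hif (by simp)
    · rw [hflt, if_pos rfl] at hif
      obtain ⟨d, hd, hfit⟩ := (inner i j).mp hif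
      exact ⟨d, hd, i, j, hfit⟩
  · rintro ⟨d, hd, r, c, hfit⟩
    have hok : OkAt R m n r c (w.getD 0 ' ') := by simpa using hfit.2.2 0 (by omega)
    obtain ⟨hnb, hcell⟩ := hok
    unfold Blk at hnb
    push_neg at hnb
    refine ⟨r, ?_, ?_⟩
    · rw [PySem.List.mem_pyRange_one]
      omega
    · rw [List.any_eq_true]
      refine ⟨c, ?_, ?_⟩
      · rw [PySem.List.mem_pyRange_one]
        omega
      · rw [if_pos ?_]
        · exact (inner r c).mpr ⟨d, hd, hfit⟩
        · rcases hcell with h | h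
          · simp [h]
          · simp [h]

theorem getD_reverse (v : List Char) (t : Nat) (ht : t < v.length) :
    v.reverse.getD t ' ' = v.getD (v.length - 1 - t) ' ' := by
  rw [List.getD_eq_getElem?_getD, List.getD_eq_getElem?_getD]
  rw [List.getElem?_eq_getElem (by simpa using ht), List.getElem?_eq_getElem (by omega)]
  simp [List.getElem_reverse]

theorem dfit_flip (R : List (List String)) (m n : Int) (w : List Char) (hw : w ≠ [])
    (r c : Int) (d1 d2 : Int) :
    DFit R m n w r c (-d1, -d2) ↔
      DFit R m n w.reverse (r - ((w.length : Int) - 1) * d1)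
        (c - ((w.length : Int) - 1) * d2) (d1, d2) := by
  have hL : 1 ≤ w.length := by
    cases w with
    | nil => exact absurd rfl hw
    | cons x xs => simp
  unfold DFit
  have hrl : w.reverse.length = w.length := by simp
  constructor
  · rintro ⟨h1, h2, h3⟩
    refine ⟨?_, ?_, ?_⟩
    · have e1 : r - ((w.length : Int) - 1) * d1 - d1 = r + (w.length : Int) * (-d1) := by ring
      have e2 : c - ((w.length : Int) - 1) * d2 - d2 = c + (w.length : Int) * (-d2) := by ring
      rw [e1, e2]
      exact h2
    · rw [hrl]
      have e1 : r - ((w.length : Int) - 1) * d1 + (w.length : Int) * d1 = r - (-d1) := by ring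
      have e2 : c - ((w.length : Int) - 1) * d2 + (w.length : Int) * d2 = c - (-d2) := by ring
      rw [e1, e2]
      exact h1
    · intro s hs
      rw [hrl] at hs
      have hthis := h3 (w.length - 1 - s) (by omega)
      have e1 : r + ((w.length - 1 - s : Nat) : Int) * (-d1)
          = r - ((w.length : Int) - 1) * d1 + (s : Int) * d1 := by
        have : ((w.length - 1 - s : Nat) : Int) = (w.length : Int) - 1 - (s : Int) := by omega
        rw [this]; ring
      have e2 : c + ((w.length - 1 - s : Nat) : Int) * (-d2)
          = c - ((w.length : Int) - 1) * d2 + (s : Int) * d2 := by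
        have : ((w.length - 1 - s : Nat) : Int) = (w.length : Int) - 1 - (s : Int) := by omega
        rw [this]; ring
      rw [e1, e2] at hthis
      rw [getD_reverse w s (by omega)]
      simpa using hthis
  · rintro ⟨h1, h2, h3⟩
    refine ⟨?_, ?_, ?_⟩
    · have e1 : r - -d1 = r - ((w.length : Int) - 1) * d1 + (w.length : Int) * d1 := by ring
      have e2 : c - -d2 = c - ((w.length : Int) - 1) * d2 + (w.length : Int) * d2 := by ring
      rw [e1, e2]
      rw [hrl] at h2
      exact h2
    · have e1 : r + (w.length : Int) * -d1 = r - ((w.length : Int) - 1) * d1 - d1 := by ring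
      have e2 : c + (w.length : Int) * -d2 = c - ((w.length : Int) - 1) * d2 - d2 := by ring
      rw [e1, e2]
      exact h1
    · intro t ht
      have hthis := h3 (w.length - 1 - t) (by omega)
      rw [getD_reverse w (w.length - 1 - t) (by omega)] at hthis
      have et : w.length - 1 - (w.length - 1 - t) = t := by omega
      rw [et] at hthis
      have e1 : r - ((w.length : Int) - 1) * d1 + ((w.length - 1 - t : Nat) : Int) * d1
          = r + (t : Int) * -d1 := by
        have : ((w.length - 1 - t : Nat) : Int) = (w.length : Int) - 1 - (t : Int) := by omega
        rw [this]; ring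
      have e2 : c - ((w.length : Int) - 1) * d2 + ((w.length - 1 - t : Nat) : Int) * d2
          = c + (t : Int) * -d2 := by
        have : ((w.length - 1 - t : Nat) : Int) = (w.length : Int) - 1 - (t : Int) := by omega
        rw [this]; ring
      rw [e1, e2] at hthis
      exact hthis

theorem pvCell_nat (R : List (List String)) (i a : Nat) (hi : i < R.length) :
    pvCell R (i : Int) (a : Int) = (R.getD i []).getD a "" := by
  unfold pvCell
  simp only [PySem.List.pyGet?_natCast]
  rw [List.getElem?_eq_getElem hi]
  rw [List.getD_eq_getElem?_getD, List.getD_eq_getElem?_getD]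
  rw [List.getElem?_eq_getElem hi]

theorem getD_map_row (R : List (List String)) (f : List String → String) (i : Nat)
    (hi : i < R.length) : (R.map f).getD i "" = f (R.getD i []) := by
  rw [List.getD_eq_getElem?_getD, List.getElem?_map, List.getElem?_eq_getElem hi,
    List.getD_eq_getElem?_getD, List.getElem?_eq_getElem hi]
  simp

theorem dfit_horiz (R : List (List String)) (m n : Int) (v : List Char) (r c : Int) :
    DFit R m n v r c (0, 1) ↔
      Blk R m n r (c - 1) ∧ Blk R m n r (c + (v.length : Int)) ∧
      ∀ t : Nat, t < v.length → OkAt R m n r (c + (t : Int)) (v.getD t ' ') := by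
  unfold DFit
  constructor <;> rintro ⟨h1, h2, h3⟩ <;>
    exact ⟨by simpa using h1, by simpa using h2, fun t ht => by simpa using h3 t ht⟩

theorem dfit_vert (R : List (List String)) (m n : Int) (v : List Char) (r c : Int) :
    DFit R m n v r c (1, 0) ↔
      Blk R m n (r - 1) c ∧ Blk R m n (r + (v.length : Int)) c ∧
      ∀ t : Nat, t < v.length → OkAt R m n (r + (t : Int)) c (v.getD t ' ') := by
  unfold DFit
  constructor <;> rintro ⟨h1, h2, h3⟩ <;>
    exact ⟨by simpa using h1, by simpa using h2, fun t ht => by simpa using h3 t ht⟩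

theorem row_bridge (R : List (List String)) (N : Nat)
    (hrect : ∀ row ∈ R, row.length = N) (v : List Char) (hv : v ≠ []) :
    (∃ r c : Int, DFit R (R.length : Int) (N : Int) v r c (0, 1)) ↔
      ∃ ℓ ∈ R, ∃ a : Nat, LineFit v ℓ a := by
  have hL : 1 ≤ v.length := List.length_pos_iff.mpr hv
  constructor
  · rintro ⟨r, c, hfit⟩
    rw [dfit_horiz] at hfit
    obtain ⟨h1, h2, h3⟩ := hfit
    have hok0 := h3 0 (by omega)
    obtain ⟨hnb0, _⟩ := hok0
    unfold Blk at hnb0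
    push_neg at hnb0
    obtain ⟨hr0, hr1, hc0, hc1, _⟩ := hnb0
    have hokL := h3 (v.length - 1) (by omega)
    obtain ⟨hnbL, _⟩ := hokL
    unfold Blk at hnbL
    push_neg at hnbL
    set i : Nat := r.toNat with hidef
    set a : Nat := c.toNat with hadef
    have hri : r = (i : Int) := by omega
    have hca : c = (a : Int) := by omega
    have hiR : i < R.length := by omega
    set ℓ : List String := R.getD i [] with hldef
    have hmem : ℓ ∈ R := by
      rw [hldef, List.getD_eq_getElem?_getD, List.getElem?_eq_getElem hiR]
      exact List.getElem_mem hiR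
    have hlen : ℓ.length = N := hrect ℓ hmem
    have hcell : ∀ x : Nat, pvCell R r (x : Int) = ℓ.getD x "" := by
      intro x
      rw [hri]
      exact pvCell_nat R i x hiR
    have haL : a + v.length ≤ N := by
      have := hnbL.2.2.2.1
      omega
    refine ⟨ℓ, hmem, a, ⟨by omega, ?_, ?_, ?_⟩⟩
    · by_cases ha : a = 0
      · exact Or.inl ha
      · right
        unfold Blk at h1
        rcases h1 with h | h | h | h | h
        · omega
        · omega
        · omega
        · omega
        · have e : c - 1 = ((a - 1 : Nat) : Int) := by omega
          rw [e, hcell (a - 1)] at h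
          exact h
    · by_cases hEnd : a + v.length = N
      · exact Or.inl (by omega)
      · right
        unfold Blk at h2
        rcases h2 with h | h | h | h | h
        · omega
        · omega
        · omega
        · omega
        · have e : c + (v.length : Int) = ((a + v.length : Nat) : Int) := by omega
          rw [e, hcell (a + v.length)] at h
          exact h
    · intro t ht
      obtain ⟨hnb, hcmp⟩ := h3 t ht
      unfold Blk at hnb
      push_neg at hnb
      have e : c + (t : Int) = ((a + t : Nat) : Int) := by omega
      rw [e, hcell (a + t)] at hnb hcmp
      exact ⟨hnb.2.2.2.2, hcmp⟩
  · rintro ⟨ℓ, hmem, a, f1, f2, f3, f4⟩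
    obtain ⟨i, hiR, hieq⟩ := List.mem_iff_getElem.mp hmem
    have hlen : ℓ.length = N := hrect ℓ hmem
    have hldg : R.getD i [] = ℓ := by
      rw [List.getD_eq_getElem?_getD, List.getElem?_eq_getElem hiR]
      simpa using hieq
    have hcell : ∀ x : Nat, pvCell R (i : Int) (x : Int) = ℓ.getD x "" := by
      intro x
      rw [pvCell_nat R i x hiR, hldg]
    refine ⟨(i : Int), (a : Int), ?_⟩
    rw [dfit_horiz]
    refine ⟨?_, ?_, ?_⟩
    · by_cases ha : a = 0
      · unfold Blk
        right; right; left
        omega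
      · unfold Blk
        right; right; right; right
        have e : (a : Int) - 1 = ((a - 1 : Nat) : Int) := by omega
        rw [e, hcell (a - 1)]
        rcases f2 with h | h
        · omega
        · exact h
    · by_cases hEnd : a + v.length = N
      · unfold Blk
        right; right; right
        left
        omega
      · unfold Blk
        right; right; right; right
        have e : (a : Int) + (v.length : Int) = ((a + v.length : Nat) : Int) := by omega
        rw [e, hcell (a + v.length)]
        rcases f3 with h | h
        · omega
        · exact h
    · intro t ht
      have hf := f4 t ht
      constructor
      · unfold Blk
        push_neg
        have e : (a : Int) + (t : Int) = ((a + t : Nat) : Int) := by omega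
        rw [e, hcell (a + t)]
        refine ⟨by omega, by omega, by omega, by omega, hf.1⟩
      · have e : (a : Int) + (t : Int) = ((a + t : Nat) : Int) := by omega
        rw [e, hcell (a + t)]
        exact hf.2

theorem col_bridge (R : List (List String)) (N : Nat)
    (_hrect : ∀ row ∈ R, row.length = N) (v : List Char) (hv : v ≠ []) :
    (∃ r c : Int, DFit R (R.length : Int) (N : Int) v r c (1, 0)) ↔
      ∃ ℓ ∈ pvColumns R N, ∃ a : Nat, LineFit v ℓ a := by
  have hL : 1 ≤ v.length := List.length_pos_iff.mpr hv
  constructor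
  · rintro ⟨r, c, hfit⟩
    rw [dfit_vert] at hfit
    obtain ⟨h1, h2, h3⟩ := hfit
    obtain ⟨hnb0, _⟩ := h3 0 (by omega)
    unfold Blk at hnb0
    push_neg at hnb0
    obtain ⟨hr0, hr1, hc0, hc1, _⟩ := hnb0
    obtain ⟨hnbL, _⟩ := h3 (v.length - 1) (by omega)
    unfold Blk at hnbL
    push_neg at hnbL
    set a : Nat := r.toNat with hadef
    set j : Nat := c.toNat with hjdef
    have hra : r = (a : Int) := by omega
    have hcj : c = (j : Int) := by omega
    have hjN : j < N := by omega
    set ℓ : List String := R.map (fun row => row.getD j "") with hldef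
    have hmem : ℓ ∈ pvColumns R N := by
      unfold pvColumns
      exact List.mem_map.mpr ⟨j, List.mem_range.mpr hjN, rfl⟩
    have hlen : ℓ.length = R.length := by simp [hldef]
    have hcell : ∀ x : Nat, x < R.length → pvCell R (x : Int) c = ℓ.getD x "" := by
      intro x hx
      rw [hcj, pvCell_nat R x j hx, hldef, getD_map_row R _ x hx]
    have haL : a + v.length ≤ R.length := by
      have := hnbL.2.1
      omega
    refine ⟨ℓ, hmem, a, ⟨by omega, ?_, ?_, ?_⟩⟩
    · by_cases ha : a = 0
      · exact Or.inl ha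
      · right
        unfold Blk at h1
        rcases h1 with h | h | h | h | h
        · omega
        · omega
        · omega
        · omega
        · have e : r - 1 = ((a - 1 : Nat) : Int) := by omega
          rw [e, hcell (a - 1) (by omega)] at h
          exact h
    · by_cases hEnd : a + v.length = R.length
      · exact Or.inl (by omega)
      · right
        unfold Blk at h2
        rcases h2 with h | h | h | h | h
        · omega
        · omega
        · omega
        · omega
        · have e : r + (v.length : Int) = ((a + v.length : Nat) : Int) := by omega
          rw [e, hcell (a + v.length) (by omega)] at h
          exact h
    · intro t ht
      obtain ⟨hnb, hcmp⟩ := h3 t ht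
      unfold Blk at hnb
      push_neg at hnb
      have e : r + (t : Int) = ((a + t : Nat) : Int) := by omega
      rw [e, hcell (a + t) (by omega)] at hnb hcmp
      exact ⟨hnb.2.2.2.2, hcmp⟩
  · rintro ⟨ℓ, hmem, a, f1, f2, f3, f4⟩
    unfold pvColumns at hmem
    obtain ⟨j, hjr, hjeq⟩ := List.mem_map.mp hmem
    have hjN : j < N := List.mem_range.mp hjr
    have hlen : ℓ.length = R.length := by rw [← hjeq]; simp
    have hcell : ∀ x : Nat, x < R.length → pvCell R (x : Int) (j : Int) = ℓ.getD x "" := by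
      intro x hx
      rw [pvCell_nat R x j hx, ← hjeq, getD_map_row R _ x hx]
    refine ⟨(a : Int), (j : Int), ?_⟩
    rw [dfit_vert]
    refine ⟨?_, ?_, ?_⟩
    · by_cases ha : a = 0
      · unfold Blk
        left
        omega
      · unfold Blk
        right; right; right; right
        have e : (a : Int) - 1 = ((a - 1 : Nat) : Int) := by omega
        rw [e, hcell (a - 1) (by omega)]
        rcases f2 with h | h
        · omega
        · exact h
    · by_cases hEnd : a + v.length = R.length
      · unfold Blk
        right
        left
        omega
      · unfold Blk
        right; right; right; right
        have e : (a : Int) + (v.length : Int) = ((a + v.length : Nat) : Int) := by omega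
        rw [e, hcell (a + v.length) (by omega)]
        rcases f3 with h | h
        · omega
        · exact h
    · intro t ht
      have hf := f4 t ht
      have e : (a : Int) + (t : Int) = ((a + t : Nat) : Int) := by omega
      constructor
      · unfold Blk
        push_neg
        rw [e, hcell (a + t) (by omega)]
        refine ⟨by omega, by omega, by omega, by omega, hf.1⟩
      · rw [e, hcell (a + t) (by omega)]
        exact hf.2

theorem getD_map_take (board : List (List String)) (N i : Nat) (hi : i < board.length) :
    (board.map (fun row => row.take N)).getD i [] = (board.getD i []).take N := by
  rw [List.getD_eq_getElem?_getD, List.getElem?_map, List.getElem?_eq_getElem hi,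
    List.getD_eq_getElem?_getD, List.getElem?_eq_getElem hi]
  simp

theorem getD_take (l : List String) (N x : Nat) (hx : x < N) :
    (l.take N).getD x "" = l.getD x "" := by
  rw [List.getD_eq_getElem?_getD, List.getD_eq_getElem?_getD, List.getElem?_take_of_lt hx]

theorem blk_congr (R R' : List (List String)) (m n : Int)
    (hcell : ∀ r c : Int, 0 ≤ r → r < m → 0 ≤ c → c < n → pvCell R r c = pvCell R' r c)
    (r c : Int) : Blk R m n r c ↔ Blk R' m n r c := by
  unfold Blk
  by_cases hb : 0 ≤ r ∧ r < m ∧ 0 ≤ c ∧ c < n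
  · rw [hcell r c hb.1 hb.2.1 hb.2.2.1 hb.2.2.2]
  · have hd : r < 0 ∨ r > m - 1 ∨ c < 0 ∨ c > n - 1 := by omega
    constructor <;> intro _ <;>
      rcases hd with h | h | h | h <;>
      exact (by first
        | exact Or.inl h
        | exact Or.inr (Or.inl h)
        | exact Or.inr (Or.inr (Or.inl h))
        | exact Or.inr (Or.inr (Or.inr (Or.inl h))))

theorem okAt_congr (R R' : List (List String)) (m n : Int)
    (hcell : ∀ r c : Int, 0 ≤ r → r < m → 0 ≤ c → c < n → pvCell R r c = pvCell R' r c)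
    (r c : Int) (ch : Char) : OkAt R m n r c ch ↔ OkAt R' m n r c ch := by
  unfold OkAt
  rw [blk_congr R R' m n hcell r c]
  apply and_congr_right
  intro hnb
  unfold Blk at hnb
  push_neg at hnb
  rw [hcell r c (by omega) (by omega) (by omega) (by omega)]

theorem dfit_congr (R R' : List (List String)) (m n : Int) (w : List Char)
    (hcell : ∀ r c : Int, 0 ≤ r → r < m → 0 ≤ c → c < n → pvCell R r c = pvCell R' r c)
    (r c : Int) (d : Int × Int) : DFit R m n w r c d ↔ DFit R' m n w r c d := by
  unfold DFit
  rw [blk_congr R R' m n hcell, blk_congr R R' m n hcell]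
  apply and_congr_right; intro _
  apply and_congr_right; intro _
  apply forall_congr'; intro t
  apply imp_congr_right; intro _
  exact okAt_congr R R' m n hcell _ _ _

theorem exists_flip (R : List (List String)) (m n : Int) (w : List Char) (hw : w ≠ [])
    (d1 d2 : Int) :
    (∃ r c : Int, DFit R m n w r c (-d1, -d2)) ↔
      ∃ r c : Int, DFit R m n w.reverse r c (d1, d2) := by
  constructor
  · rintro ⟨r, c, h⟩
    exact ⟨_, _, (dfit_flip R m n w hw r c d1 d2).mp h⟩
  · rintro ⟨r, c, h⟩
    refine ⟨r + ((w.length : Int) - 1) * d1, c + ((w.length : Int) - 1) * d2, ?_⟩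
    rw [dfit_flip R m n w hw _ _ d1 d2]
    simpa using h

set_option maxHeartbeats 1000000 in
theorem placeWordInCrossword_main : ∀ (board : List (List String)) (word : String),
    board ≠ [] ∧ word ≠ "" ∧ (∀ row ∈ board, (board.headD []).length ≤ row.length) →
    placeWordInCrossword board word = placeWordInCrossword_alt board word := by
  intro board word hpre
  obtain ⟨hB0, hw0, hge⟩ := hpre
  have hw : word.toList ≠ [] := by
    intro h
    exact hw0 (by simpa using congrArg String.ofList h)
  have headEq : ((PySem.List.pyGet? board 0).getD []) = board.headD [] := by
    cases board with
    | nil => simp [PySem.List.pyGet?]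
    | cons h t => rw [PySem.List.pyGet?_zero]; simp
  have hrev : word.toList.reverse.length = word.toList.length := by simp
  have hrevne : word.toList.reverse ≠ [] := by simpa using hw
  set N : Nat := (board.headD []).length with hN
  set grid : List (List String) := board.map (fun row => row.take N) with hgrid
  have hrectg : ∀ row ∈ grid, row.length = N := by
    intro row hr
    rw [hgrid] at hr
    obtain ⟨r0, hr0, rfl⟩ := List.mem_map.mp hr
    simp only [List.length_take]
    exact min_eq_left (hge r0 hr0)
  have hglen : grid.length = board.length := by rw [hgrid]; simp
  have hcell : ∀ r c : Int, 0 ≤ r → r < (board.length : Int) → 0 ≤ c → c < (N : Int) →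
      pvCell board r c = pvCell grid r c := by
    intro r c hr0 hr1 hc0 hc1
    have hri : r = ((r.toNat : Nat) : Int) := by omega
    have hci : c = ((c.toNat : Nat) : Int) := by omega
    have hiR : r.toNat < board.length := by omega
    have hiG : r.toNat < grid.length := by omega
    rw [hri, hci, pvCell_nat board r.toNat c.toNat hiR, pvCell_nat grid r.toNat c.toNat hiG]
    rw [hgrid, getD_map_take board N r.toNat hiR, getD_take _ N c.toNat (by omega)]
  have hA := A_iff board word hw
  rw [headEq] at hA
  have hmove : ∀ P : Int × Int → Prop,
      (∃ d ∈ pvMove, P d) ↔ P (0, 1) ∨ P (1, 0) ∨ P (-1, 0) ∨ P (0, -1) := by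
    intro P
    simp [pvMove]
  rw [hmove] at hA
  have hgd : ∀ d : Int × Int,
      (∃ r c : Int, DFit board (board.length : Int) (N : Int) word.toList r c d) ↔
        ∃ r c : Int, DFit grid (grid.length : Int) (N : Int) word.toList r c d := by
    intro d
    have hml : (board.length : Int) = (grid.length : Int) := by rw [hglen]
    refine exists_congr fun r => exists_congr fun c => ?_
    rw [← hml]
    exact dfit_congr board grid (board.length : Int) (N : Int) word.toList hcell r c d
  rw [hgd (0, 1), hgd (1, 0), hgd (-1, 0), hgd (0, -1)] at hA
  have e3 := exists_flip grid (grid.length : Int) (N : Int) word.toList hw 1 0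
  have e4 := exists_flip grid (grid.length : Int) (N : Int) word.toList hw 0 1
  simp only [neg_zero] at e3 e4
  rw [e3, e4] at hA
  rw [row_bridge grid N hrectg word.toList hw,
      col_bridge grid N hrectg word.toList.reverse hrevne,
      col_bridge grid N hrectg word.toList hw,
      row_bridge grid N hrectg word.toList.reverse hrevne] at hA
  have hBany : placeWordInCrossword_alt board word =
      (grid ++ pvColumns grid N).any (pvScanLine word.toList word.toList.reverse) := rfl
  have hB : placeWordInCrossword_alt board word = true ↔
      ∃ ℓ ∈ grid ++ pvColumns grid N, ∃ a,
        LineFit word.toList ℓ a ∨ LineFit word.toList.reverse ℓ a := by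
    rw [hBany, List.any_eq_true]
    constructor
    · rintro ⟨ℓ, hm, hs⟩
      exact ⟨ℓ, hm, (scanLine_iff word.toList word.toList.reverse hrev ℓ).mp hs⟩
    · rintro ⟨ℓ, hm, hs⟩
      exact ⟨ℓ, hm, (scanLine_iff word.toList word.toList.reverse hrev ℓ).mpr hs⟩
  have hB4 : placeWordInCrossword_alt board word = true ↔
      ((∃ ℓ ∈ grid, ∃ a, LineFit word.toList ℓ a) ∨
       (∃ ℓ ∈ pvColumns grid N, ∃ a, LineFit word.toList ℓ a) ∨
       (∃ ℓ ∈ pvColumns grid N, ∃ a, LineFit word.toList.reverse ℓ a) ∨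
       (∃ ℓ ∈ grid, ∃ a, LineFit word.toList.reverse ℓ a)) := by
    rw [hB]
    constructor
    · rintro ⟨ℓ, hm, a, hf | hf⟩
      · rcases List.mem_append.mp hm with h | h
        · exact Or.inl ⟨ℓ, h, a, hf⟩
        · exact Or.inr (Or.inl ⟨ℓ, h, a, hf⟩)
      · rcases List.mem_append.mp hm with h | h
        · exact Or.inr (Or.inr (Or.inr ⟨ℓ, h, a, hf⟩))
        · exact Or.inr (Or.inr (Or.inl ⟨ℓ, h, a, hf⟩))
    · rintro (⟨ℓ, h, a, hf⟩ | ⟨ℓ, h, a, hf⟩ | ⟨ℓ, h, a, hf⟩ | ⟨ℓ, h, a, hf⟩)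
      · exact ⟨ℓ, List.mem_append.mpr (Or.inl h), a, Or.inl hf⟩
      · exact ⟨ℓ, List.mem_append.mpr (Or.inr h), a, Or.inl hf⟩
      · exact ⟨ℓ, List.mem_append.mpr (Or.inr h), a, Or.inr hf⟩
      · exact ⟨ℓ, List.mem_append.mpr (Or.inl h), a, Or.inr hf⟩
  rw [Bool.eq_iff_iff, hA, hB4]


-- ===== VERDICT (by name: the statement is the Claim_ definition above) =====
theorem placeWordInCrossword_spec : Claim_equal_placeWordInCrossword := by
  intro board word _ hpre
  exact placeWordInCrossword_main board word hpre
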